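-- pv_equiv track=rewrite | github.com/Joooook/Cryptography-Lab | Lab7/RSA_ModulusFactor.py | Nfactor
-- ===== SOURCE A (Python) =====
-- def quick_pow(a, b, N):
--     ans = 1
--     while b:
--         if b & 1:
--             ans = ans * a % N
--         a = a * a % N
--         b = b >> 1
--     return ans%N
--
-- def gcd(x, y):
--     while (y):
--         x, y = y, x % y
--     return x
--
-- def Nfactor(e,d,n):
--     for i in range(1,n):
--         k=e*d-1
--         while k%2==0:
--             k = k // 2
--             x=quick_pow(i,k,n)
--             if x>1 and gcd(x-1,n)>1:
--                 return gcd(x-1,n),n//gcd(x-1,n)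
-- ===== SOURCE B (Python) =====
-- import math
--
-- def Nfactor(e, d, n):
--     # Factor k = e*d-1 as 2^s * t (t odd) once; per base i, build the square
--     # chain i^t, i^(2t), ..., i^(2^(s-1) t) mod n and scan it in descending
--     # exponent order (the same order A probes).
--     t = e * d - 1
--     s = 0
--     while t > 0 and t % 2 == 0:
--         t //= 2
--         s += 1
--     if s == 0:
--         return None
--     for i in range(1, n):
--         base = pow(i, t, n)
--         powers = [base]
--         for _ in range(s - 1):
--             base = base * base % n
--             powers.append(base)
--         for x in reversed(powers):
--             if x > 1 and math.gcd(x - 1, n) > 1: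
--                 g = math.gcd(x - 1, n)
--                 return g, n // g
-- ===== Notes on version B (the rewrite author's own statement) =====
-- stated objective: faster
-- what changed: B factors e*d-1 = 2^s*t once up front and, for each base i, does a single modular exponentiation i^t mod n followed by s-1 incremental squarings collected in a list scanned in descending exponent order, instead of A's re-running a full square-and-multiply quick_pow from scratch at every halving step of the inner while-loop.
import Mathlib
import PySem

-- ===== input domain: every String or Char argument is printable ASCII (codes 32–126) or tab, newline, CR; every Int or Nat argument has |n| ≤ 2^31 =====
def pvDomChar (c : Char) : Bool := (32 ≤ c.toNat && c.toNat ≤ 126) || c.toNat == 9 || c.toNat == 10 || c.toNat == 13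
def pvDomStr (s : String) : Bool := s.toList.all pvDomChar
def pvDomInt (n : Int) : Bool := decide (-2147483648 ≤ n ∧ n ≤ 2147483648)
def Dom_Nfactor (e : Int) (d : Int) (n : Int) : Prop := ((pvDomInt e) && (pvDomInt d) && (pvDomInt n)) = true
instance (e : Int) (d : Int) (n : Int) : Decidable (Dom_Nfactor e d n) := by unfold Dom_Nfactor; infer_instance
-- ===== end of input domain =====

-- B re-implements Nfactor by factoring e*d-1 = 2^s*t once up front and, per base i,
-- building the incremental square chain i^t, i^(2t), ... mod n, scanned in descending
-- exponent order — instead of A's full quick_pow from scratch at every halving step.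

-- ===== PORT A =====
-- while-loop of quick_pow; Python loops forever when b < 0 (b >> 1 converges to -1),
-- so the 'b ≤ 0' guard only makes the port total: it is exact for b ≥ 0 (b = 0 exits).
def quickPowGo (ans a b N : Int) : Int :=
  if h : b ≤ 0 then PySem.Int.mod ans N
  else
    quickPowGo (if PySem.Int.band b 1 ≠ 0 then PySem.Int.mod (ans * a) N else ans)
      (PySem.Int.mod (a * a) N) (b >>> (1:Nat)) N
termination_by b.toNat
decreasing_by
  have h2 : (b >>> (1:Nat) : Int) = b / 2 := by simpa using Int.shiftRight_eq_div_pow b 1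
  omega

def quick_pow (a b N : Int) : Int := quickPowGo 1 a b N

def gcdA (x y : Int) : Int :=
  if h : y = 0 then x else gcdA y (PySem.Int.mod x y)
termination_by y.natAbs
decreasing_by
  rcases lt_trichotomy y 0 with hy | hy | hy
  · have := PySem.Int.mod_neg_bounds (a := x) hy; omega
  · exact absurd hy (by simpa using h)
  · have h1 := PySem.Int.mod_nonneg (a := x) hy
    have h2 := PySem.Int.mod_lt (a := x) hy
    omega

-- A's inner 'while k % 2 == 0' loop; Python loops forever when k ≤ 0 and even
-- (k // 2 never reaches an odd number > 0), so the 'k ≤ 0' guard only makes the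
-- port total; those inputs are excluded by Pre_Nfactor.
def innerA (i n k : Int) : Option (Int × Int) :=
  if PySem.Int.mod k 2 = 0 then
    if h : k ≤ 0 then none
    else
      let k' := PySem.Int.floordiv k 2
      let x := quick_pow i k' n
      if x > 1 ∧ gcdA (x - 1) n > 1 then
        some (gcdA (x - 1) n, PySem.Int.floordiv n (gcdA (x - 1) n))
      else innerA i n k'
  else none
termination_by k.toNat
decreasing_by
  have := PySem.Int.floordiv_eq_ediv_of_pos (a := k) (show (0:Int) < 2 by norm_num)
  omega

def outerA (e d n : Int) : List Int → Option (Int × Int)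
  | [] => none
  | i :: rest =>
    match innerA i n (e * d - 1) with
    | some r => some r
    | none => outerA e d n rest

def Nfactor (e : Int) (d : Int) (n : Int) : Option (Int × Int) :=
  outerA e d n (PySem.List.pyRange 1 n 1)

-- ===== PORT B =====
-- 'while t > 0 and t % 2 == 0: t //= 2; s += 1'
def tsLoop (t s : Int) : Int × Int :=
  if h : 0 < t ∧ PySem.Int.mod t 2 = 0 then tsLoop (PySem.Int.floordiv t 2) (s + 1)
  else (t, s)
termination_by t.toNat
decreasing_by
  have := PySem.Int.floordiv_eq_ediv_of_pos (a := t) (show (0:Int) < 2 by norm_num)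
  omega

-- builtin pow(i, t, n); exact for t ≥ 0 and n > 0 (every call has t > 0, n ≥ 2)
def powModB (i t n : Int) : Int := PySem.Int.mod (i ^ t.toNat) n

-- 'powers = [base]' then 'for _ in range(s-1): base = base*base % n; powers.append(base)'
def sqChain (base n : Int) : Nat → List Int
  | 0 => [base]
  | m + 1 => base :: sqChain (PySem.Int.mod (base * base) n) n m

-- 'for x in reversed(powers): ...' (applied to powers.reverse)
def scanDesc (n : Int) : List Int → Option (Int × Int)
  | [] => none
  | x :: rest =>
    if x > 1 ∧ (Int.gcd (x - 1) n : Int) > 1 then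
      some ((Int.gcd (x - 1) n : Int), PySem.Int.floordiv n (Int.gcd (x - 1) n))
    else scanDesc n rest

def outerB (t s n : Int) : List Int → Option (Int × Int)
  | [] => none
  | i :: rest =>
    match scanDesc n (sqChain (powModB i t n) n (s - 1).toNat).reverse with
    | some r => some r
    | none => outerB t s n rest

def Nfactor_alt (e : Int) (d : Int) (n : Int) : Option (Int × Int) :=
  let ts := tsLoop (e * d - 1) 0
  if ts.2 = 0 then none
  else outerB ts.1 ts.2 n (PySem.List.pyRange 1 n 1)

-- ===== PRECONDITION & SPEC =====
-- Pre_ excludes exactly the inputs on which A never returns: n ≥ 2 together with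
-- e*d-1 ≤ 0 and even makes A's inner while-loop (or quick_pow) run forever.
def Pre_Nfactor (e : Int) (d : Int) (n : Int) : Prop :=
  n ≤ 1 ∨ 0 < e * d - 1 ∨ (e * d - 1) % 2 = 1
instance (e : Int) (d : Int) (n : Int) : Decidable (Pre_Nfactor e d n) := by
  unfold Pre_Nfactor; infer_instance

def pvWitness_Nfactor : Int × Int × Int := (7, 23, 33)

def Spec_Nfactor (e : Int) (d : Int) (n : Int) (out : Option (Int × Int)) : Prop := out = Nfactor_alt e d n
instance (e : Int) (d : Int) (n : Int) (out : Option (Int × Int)) : Decidable (Spec_Nfactor e d n out) := by unfold Spec_Nfactor; infer_instance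

-- ===== CLAIM (what is proved, stated in full; the proofs are below) =====
def Claim_equal_Nfactor : Prop := ∀ (e : Int) (d : Int) (n : Int), Dom_Nfactor e d n → Pre_Nfactor e d n → Spec_Nfactor e d n (Nfactor e d n)

-- ===== LEMMAS AND PROOFS =====

-- x = i^(2^j * t) mod n, the value both programs test at step j
def chainVal (i n : Int) (t j : Nat) : Int := (i ^ (2 ^ j * t)) % n

-- the common descending scan: test chainVal at j = s-1, s-2, ..., 0
def descScan (i n : Int) (t : Nat) : Nat → Option (Int × Int)
  | 0 => none
  | j + 1 =>
    if chainVal i n t j > 1 ∧ (Int.gcd (chainVal i n t j - 1) n : Int) > 1 then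
      some ((Int.gcd (chainVal i n t j - 1) n : Int),
        PySem.Int.floordiv n (Int.gcd (chainVal i n t j - 1) n))
    else descScan i n t j

theorem pvMulEmodLeft (x y N : Int) : (x % N) * y % N = x * y % N := by
  conv_lhs => rw [Int.mul_emod]
  rw [Int.emod_emod_of_dvd _ dvd_rfl, ← Int.mul_emod]

theorem pvMulEmodRight (x y N : Int) : x * (y % N) % N = x * y % N := by
  conv_lhs => rw [Int.mul_emod]
  rw [Int.emod_emod_of_dvd _ dvd_rfl, ← Int.mul_emod]

theorem pvPowEmod (a N : Int) : ∀ k : Nat, (a % N) ^ k % N = a ^ k % N := by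
  intro k
  induction k with
  | zero => simp
  | succ k ih =>
    rw [pow_succ, pow_succ, pvMulEmodRight, ← pvMulEmodLeft ((a % N) ^ k), ih, pvMulEmodLeft]

theorem quickPowGo_eq (N : Int) (hN : 0 < N) :
    ∀ (m : Nat) (ans a b : Int), 0 ≤ b → b.toNat ≤ m →
      quickPowGo ans a b N = (ans * a ^ b.toNat) % N := by
  intro m
  induction m with
  | zero =>
    intro ans a b hb hm
    have hb0 : b = 0 := by omega
    subst hb0
    rw [quickPowGo, dif_pos le_rfl]
    simp [PySem.Int.mod_eq_emod_of_pos hN]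
  | succ m ih =>
    intro ans a b hb hm
    by_cases h0 : b ≤ 0
    · have hb0 : b = 0 := le_antisymm h0 hb
      subst hb0
      rw [quickPowGo, dif_pos le_rfl]
      simp [PySem.Int.mod_eq_emod_of_pos hN]
    · rw [quickPowGo, dif_neg h0]
      have hbpos : 0 < b := by omega
      have hshift : (b >>> (1:Nat) : Int) = b / 2 := by
        simpa using Int.shiftRight_eq_div_pow b 1
      have hdiv : 0 ≤ b / 2 := by omega
      have hlt : (b / 2).toNat ≤ m := by omega
      rw [hshift, ih _ _ _ hdiv hlt, PySem.Int.band_one,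
        PySem.Int.mod_eq_emod_of_pos (show (0:Int) < 2 by norm_num)]
      have hmodN : ∀ z : Int, PySem.Int.mod z N = z % N := fun z =>
        PySem.Int.mod_eq_emod_of_pos hN
      have hbt : b.toNat = 2 * (b / 2).toNat + (b % 2).toNat := by omega
      have hkey : ((a * a % N) ^ (b / 2).toNat) % N = a ^ (2 * (b / 2).toNat) % N := by
        rw [pvPowEmod]
        congr 1
        rw [two_mul, pow_add, ← mul_pow]
      by_cases hpar : b % 2 = 0
      · have hbt' : b.toNat = 2 * (b / 2).toNat := by omega
        rw [if_neg (by simp [hpar]), hmodN, hbt']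
        rw [← pvMulEmodRight ans ((a * a % N) ^ (b / 2).toNat) N, hkey, pvMulEmodRight]
      · have hbt' : b.toNat = 2 * (b / 2).toNat + 1 := by omega
        rw [if_pos (by simp [hpar]), hmodN, hmodN, hbt']
        rw [pvMulEmodLeft,
          ← pvMulEmodRight (ans * a) ((a * a % N) ^ (b / 2).toNat) N, hkey, pvMulEmodRight]
        congr 1
        rw [pow_succ]; ring

theorem gcdA_eq (m : Nat) : ∀ (x y : Int), 0 ≤ x → 0 ≤ y → y.natAbs ≤ m →
    gcdA x y = Int.gcd x y := by
  induction m with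
  | zero =>
    intro x y hx hy hm
    have hy0 : y = 0 := by omega
    subst hy0
    rw [gcdA, dif_pos rfl]
    simp [Int.gcd, Int.natAbs_of_nonneg hx]
  | succ m ih =>
    intro x y hx hy hm
    by_cases hy0 : y = 0
    · subst hy0
      rw [gcdA, dif_pos rfl]
      simp [Int.gcd, Int.natAbs_of_nonneg hx]
    · have hypos : 0 < y := by omega
      rw [gcdA, dif_neg hy0, PySem.Int.mod_eq_emod_of_pos hypos]
      have h1 : 0 ≤ x % y := Int.emod_nonneg x hy0
      have h2 : x % y < y := Int.emod_lt_of_pos x hypos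
      rw [ih y (x % y) hy h1 (by omega)]
      -- Int.gcd y (x % y) = Int.gcd x y, via Nat.gcd_rec on the toNat images
      obtain ⟨a, rfl⟩ := Int.eq_ofNat_of_zero_le hx
      obtain ⟨bq, rfl⟩ := Int.eq_ofNat_of_zero_le hy
      have hcast : ((a : Int) % (bq : Int)) = ((a % bq : Nat) : Int) := by
        omega
      rw [hcast]
      simp only [Int.gcd_natCast_natCast]
      rw [Nat.gcd_comm a bq, Nat.gcd_rec bq a]
      rw [Nat.gcd_comm]

theorem innerA_eq (i n : Int) (hn : 0 < n) (t : Nat) (ht : t % 2 = 1) :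
    ∀ s : Nat, innerA i n ((2 ^ s * t : Nat)) = descScan i n t s := by
  intro s
  induction s with
  | zero =>
    rw [innerA, descScan]
    have : PySem.Int.mod ((2 ^ 0 * t : Nat) : Int) 2 = 1 := by
      rw [PySem.Int.mod_eq_emod_of_pos (show (0:Int) < 2 by norm_num)]
      omega
    rw [if_neg (by omega)]
  | succ s ihs =>
    have hkodd : ((2 ^ (s + 1) * t : Nat) : Int) % 2 = 0 := by
      have : (2 ^ (s + 1) * t) % 2 = 0 := by
        simp [pow_succ, Nat.mul_mod, Nat.mul_assoc]
      omega
    have htpos : 1 ≤ t := by omega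
    have hkpos : 0 < ((2 ^ (s + 1) * t : Nat) : Int) := by
      have : 0 < 2 ^ (s + 1) * t := by positivity
      omega
    rw [innerA]
    rw [if_pos (by rw [PySem.Int.mod_eq_emod_of_pos (show (0:Int) < 2 by norm_num)]; exact hkodd)]
    rw [dif_neg (by omega)]
    have hk' : PySem.Int.floordiv ((2 ^ (s + 1) * t : Nat) : Int) 2 = ((2 ^ s * t : Nat) : Int) := by
      rw [PySem.Int.floordiv_eq_ediv_of_pos (show (0:Int) < 2 by norm_num)]
      have : (2 ^ (s + 1) * t) = 2 * (2 ^ s * t) := by ring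
      omega
    simp only [hk']
    have hx : quick_pow i ((2 ^ s * t : Nat) : Int) n = chainVal i n t s := by
      rw [quick_pow, quickPowGo_eq n hn ((2 ^ s * t : Nat) : Int).toNat _ _ _ (by positivity) le_rfl]
      rw [Int.toNat_natCast, one_mul]
      rfl
    rw [hx, descScan]
    by_cases hxgt : chainVal i n t s > 1
    · have hxm1 : 0 ≤ chainVal i n t s - 1 := by omega
      have hgcd : gcdA (chainVal i n t s - 1) n = Int.gcd (chainVal i n t s - 1) n :=
        gcdA_eq n.natAbs _ n hxm1 (le_of_lt hn) le_rfl
      rw [hgcd]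
      by_cases hg : (Int.gcd (chainVal i n t s - 1) n : Int) > 1
      · rw [if_pos ⟨hxgt, hg⟩, if_pos ⟨hxgt, hg⟩]
      · rw [if_neg (by tauto), if_neg (by tauto)]
        exact ihs
    · rw [if_neg (by tauto), if_neg (by tauto)]
      exact ihs

theorem sqChain_eq (i n : Int) (hn : 0 < n) (t : Nat) :
    ∀ (m j : Nat), sqChain (chainVal i n t j) n m =
      (List.range (m + 1)).map (fun l => chainVal i n t (j + l)) := by
  intro m
  induction m with
  | zero => intro j; simp [sqChain, List.range_succ]
  | succ m ih =>
    intro j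
    have hstep : PySem.Int.mod (chainVal i n t j * chainVal i n t j) n = chainVal i n t (j + 1) := by
      rw [PySem.Int.mod_eq_emod_of_pos hn]
      unfold chainVal
      rw [pvMulEmodLeft, pvMulEmodRight, ← pow_add]
      congr 2
      ring
    rw [sqChain, hstep, ih (j + 1)]
    conv_rhs => rw [List.range_succ_eq_map, List.map_cons, List.map_map]
    congr 1
    apply List.map_congr_left
    intro a _
    simp only [Function.comp_apply]
    congr 1
    omega

theorem scanDesc_eq (i n : Int) (t : Nat) :
    ∀ s : Nat, scanDesc n (((List.range s).map (fun l => chainVal i n t l)).reverse) =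
      descScan i n t s := by
  intro s
  induction s with
  | zero => rfl
  | succ s ih =>
    rw [List.range_succ, List.map_append, List.reverse_append]
    simp only [List.map_cons, List.map_nil, List.reverse_cons, List.reverse_nil,
      List.nil_append, List.singleton_append]
    rw [scanDesc, descScan]
    split
    · rfl
    · exact ih

theorem tsLoop_eq (m : Nat) : ∀ (k s0 : Int), 0 < k → k.toNat ≤ m →
    ∃ (s : Nat) (t : Nat), tsLoop k s0 = ((t : Int), s0 + s) ∧ k = (2 ^ s * t : Nat) ∧ t % 2 = 1 := by
  induction m with
  | zero => intro k s0 hk hm; omega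
  | succ m ih =>
    intro k s0 hk hm
    by_cases hc : PySem.Int.mod k 2 = 0
    · have hke : k % 2 = 0 := by
        rwa [PySem.Int.mod_eq_emod_of_pos (show (0:Int) < 2 by norm_num)] at hc
      rw [tsLoop, dif_pos ⟨hk, hc⟩,
        PySem.Int.floordiv_eq_ediv_of_pos (show (0:Int) < 2 by norm_num)]
      have hk2 : 0 < k / 2 := by omega
      obtain ⟨s, t, h1, h2, h3⟩ := ih (k / 2) (s0 + 1) hk2 (by omega)
      refine ⟨s + 1, t, ?_, ?_, h3⟩
      · rw [h1]
        congr 1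
        push_cast; ring
      · have hk2' : k = 2 * (k / 2) := by omega
        rw [hk2', h2]; push_cast [pow_succ]; ring
    · rw [tsLoop, dif_neg (by tauto)]
      have hkt : ((k.toNat : Nat) : Int) = k := by omega
      refine ⟨0, k.toNat, by simp [hkt], by simp [hkt], ?_⟩
      have hmod : k % 2 = 1 := by
        have h2 := PySem.Int.mod_eq_emod_of_pos (a := k) (show (0:Int) < 2 by norm_num)
        omega
      omega

theorem innerA_odd (i n k : Int) (hk : k % 2 = 1) : innerA i n k = none := by
  rw [innerA, if_neg]
  rw [PySem.Int.mod_eq_emod_of_pos (show (0:Int) < 2 by norm_num)]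
  omega

theorem tsLoop_stop (k s0 : Int) (h : ¬ (0 < k ∧ PySem.Int.mod k 2 = 0)) : tsLoop k s0 = (k, s0) := by
  rw [tsLoop, dif_neg h]

-- ===== VERDICT (by name: the statement is the Claim_ definition above) =====
theorem outerA_none (e d n : Int) (h : ∀ i, innerA i n (e * d - 1) = none) :
    ∀ L : List Int, outerA e d n L = none := by
  intro L
  induction L with
  | nil => rfl
  | cons i r ihr => rw [outerA, h i, ihr]

theorem outerAB (e d n : Int) (t s : Int)
    (h : ∀ i, innerA i n (e * d - 1) =
      scanDesc n (sqChain (powModB i t n) n (s - 1).toNat).reverse) :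
    ∀ L : List Int, outerA e d n L = outerB t s n L := by
  intro L
  induction L with
  | nil => rfl
  | cons i r ihr => rw [outerA, outerB, h i, ihr]

theorem Nfactor_spec : Claim_equal_Nfactor := by
  intro e d n _ hpre
  unfold Spec_Nfactor Nfactor Nfactor_alt
  set k := e * d - 1 with hk
  by_cases hn : n ≤ 1
  · rw [PySem.List.pyRange_one_eq_nil (by omega)]
    by_cases hts : (tsLoop k 0).2 = 0 <;> simp [hts, outerA, outerB]
  · have hnpos : 0 < n := by omega
    by_cases hodd : k % 2 = 1
    · have hstop := tsLoop_stop k 0 (by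
        rintro ⟨-, hm⟩
        rw [PySem.Int.mod_eq_emod_of_pos (show (0:Int) < 2 by norm_num)] at hm
        omega)
      have hA := outerA_none e d n (fun i => innerA_odd i n k hodd) (PySem.List.pyRange 1 n 1)
      rw [hA]
      simp [hstop]
    · have hkpos : 0 < k := by
        rcases hpre with h1 | h1 | h1
        · omega
        · omega
        · omega
      obtain ⟨s, t, hts, hkeq, htodd⟩ := tsLoop_eq k.toNat k 0 hkpos le_rfl
      have hspos : 0 < s := by
        rcases Nat.eq_zero_or_pos s with hs0 | hs0
        · subst hs0
          simp at hkeq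
          omega
        · exact hs0
      have hper : ∀ i, innerA i n k =
          scanDesc n (sqChain (powModB i (t : Int) n) n (((s : Nat) : Int) - 1).toNat).reverse := by
        intro i
        rw [hkeq, innerA_eq i n hnpos t htodd s]
        have hbase : powModB i (t : Int) n = chainVal i n t 0 := by
          unfold powModB chainVal
          rw [PySem.Int.mod_eq_emod_of_pos hnpos, Int.toNat_natCast]
          norm_num
        have hcnt : (((s : Nat) : Int) - 1).toNat = s - 1 := by omega
        rw [hbase, hcnt, sqChain_eq i n hnpos t (s - 1) 0]
        have hrange : s - 1 + 1 = s := by omega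
        rw [hrange]
        have hfun : (fun l => chainVal i n t (0 + l)) = fun l => chainVal i n t l := by
          funext l; rw [Nat.zero_add]
        rw [hfun, scanDesc_eq i n t s]
      rw [hts]
      have hsne : ((0 : Int) + (s : Int)) ≠ 0 := by
        have : (0 : Int) < (s : Int) := by exact_mod_cast hspos
        omega
      rw [if_neg hsne]
      have hker : ∀ i, innerA i n (e * d - 1) =
          scanDesc n (sqChain (powModB i (t : Int) n) n (((0:Int) + (s : Int)) - 1).toNat).reverse := by
        intro i
        rw [← hk]
        rw [hper i]
        have h9 : (((0:Int) + (s : Int)) - 1).toNat = (((s : Nat) : Int) - 1).toNat := by omega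
        rw [h9]
      exact outerAB e d n (t : Int) ((0:Int) + (s : Int)) hker (PySem.List.pyRange 1 n 1)
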